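-- pv_equiv track=rewrite | github.com/Cityofstarso-O/ImmerScape | util/utils.py | compute_tex_size
-- ===== SOURCE A (Python) =====
-- def alignUp(x, alignment):
--     return ((x + alignment - 1) // alignment) * alignment
--
-- def compute_tex_size(texel_num: int, chunkBased: bool) -> tuple:
--     # we wanna pad as less as possible
--     # for general usage, width and height are limited to 4096
--     if texel_num <= 0:
--         return 0, 0
--
--     max_height = max_width = 4096 // 16 if chunkBased else 4096
--
--     if texel_num > max_height * max_width:
--         raise ValueError("point num is too large! Should be less or equal to 4096 * 4096!")
--
--     # suppose we have i columns of max_height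
--     for i in range(1, max_width + 1):
--         if texel_num <= i * max_height:
--             return i, alignUp(texel_num, i) // i
--
--     return 0, 0
-- ===== SOURCE B (Python) =====
-- def compute_tex_size(texel_num: int, chunkBased: bool) -> tuple:
--     if texel_num <= 0:
--         return 0, 0
--
--     max_height = max_width = 4096 // 16 if chunkBased else 4096
--
--     if texel_num > max_height * max_width:
--         raise ValueError("point num is too large! Should be less or equal to 4096 * 4096!")
--
--     # smallest column count i with texel_num <= i * max_height, in closed form
--     i = (texel_num + max_height - 1) // max_height
--     return i, (texel_num + i - 1) // i
-- ===== Notes on version B (the rewrite author's own statement) =====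
-- stated objective: simpler
-- what changed: Replaces A's linear scan over column counts 1..max_width with a closed-form ceiling division i = ceil(texel_num/max_height) and a direct ceil(texel_num/i) for the height.
import Mathlib
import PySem

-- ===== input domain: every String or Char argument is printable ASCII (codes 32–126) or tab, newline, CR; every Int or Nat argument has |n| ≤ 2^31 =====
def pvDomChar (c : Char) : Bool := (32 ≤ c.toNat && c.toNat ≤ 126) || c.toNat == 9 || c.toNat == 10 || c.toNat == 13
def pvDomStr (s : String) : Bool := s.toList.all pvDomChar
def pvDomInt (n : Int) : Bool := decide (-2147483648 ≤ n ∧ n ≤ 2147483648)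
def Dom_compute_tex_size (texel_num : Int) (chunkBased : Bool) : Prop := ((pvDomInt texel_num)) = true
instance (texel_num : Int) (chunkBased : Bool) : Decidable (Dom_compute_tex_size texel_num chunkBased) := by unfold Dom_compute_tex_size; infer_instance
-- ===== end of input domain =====

-- B replaces A's linear scan over column counts with a closed-form ceiling division (simpler).

-- ===== PORT A =====
def alignUp (x alignment : Int) : Int :=
  PySem.Int.floordiv (x + alignment - 1) alignment * alignment

-- the `for i in range(1, max_width+1)` loop with its early return
def ctsLoopA (texel_num max_height : Int) : List Int → Int × Int
  | [] => (0, 0)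
  | i :: rest =>
      if texel_num ≤ i * max_height then (i, PySem.Int.floordiv (alignUp texel_num i) i)
      else ctsLoopA texel_num max_height rest

def compute_tex_size (texel_num : Int) (chunkBased : Bool) : Int × Int :=
  if texel_num ≤ 0 then (0, 0)
  else
    let max_height : Int := if chunkBased then PySem.Int.floordiv 4096 16 else 4096
    let max_width := max_height
    if texel_num > max_height * max_width then (0, 0)  -- Python raises ValueError here; excluded by Pre_
    else ctsLoopA texel_num max_height (PySem.List.pyRange 1 (max_width + 1) 1)

-- ===== PORT B =====
def compute_tex_size_alt (texel_num : Int) (chunkBased : Bool) : Int × Int :=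
  if texel_num ≤ 0 then (0, 0)
  else
    let max_height : Int := if chunkBased then PySem.Int.floordiv 4096 16 else 4096
    let max_width := max_height
    if texel_num > max_height * max_width then (0, 0)  -- Python raises ValueError here; excluded by Pre_
    else
      let i := PySem.Int.floordiv (texel_num + max_height - 1) max_height
      (i, PySem.Int.floordiv (texel_num + i - 1) i)

-- ===== PRECONDITION & SPEC =====
-- Pre_ excludes exactly the inputs where A raises ValueError (texel_num larger than the texture capacity).
def Pre_compute_tex_size (texel_num : Int) (chunkBased : Bool) : Prop :=
  texel_num ≤ (if chunkBased then (256 : Int) else 4096) * (if chunkBased then (256 : Int) else 4096)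
instance (texel_num : Int) (chunkBased : Bool) : Decidable (Pre_compute_tex_size texel_num chunkBased) := by
  unfold Pre_compute_tex_size; infer_instance

def pvWitness_compute_tex_size : Int × Bool := (5000, false)

def Spec_compute_tex_size (texel_num : Int) (chunkBased : Bool) (out : Int × Int) : Prop :=
  out = compute_tex_size_alt texel_num chunkBased
instance (texel_num : Int) (chunkBased : Bool) (out : Int × Int) : Decidable (Spec_compute_tex_size texel_num chunkBased out) := by
  unfold Spec_compute_tex_size; infer_instance

-- ===== CLAIM =====
def Claim_equal_compute_tex_size : Prop :=
  ∀ (texel_num : Int) (chunkBased : Bool), Dom_compute_tex_size texel_num chunkBased →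
    Pre_compute_tex_size texel_num chunkBased →
    Spec_compute_tex_size texel_num chunkBased (compute_tex_size texel_num chunkBased)

-- ===== LEMMAS AND PROOFS =====

-- The loop over consecutive integers [a, b) returns at the first (= smallest) hit i0.
theorem ctsLoopA_pyRange (t m a b i0 : Int) (hm : 0 < m)
    (ha : a ≤ i0) (hb : i0 < b)
    (hhit : t ≤ i0 * m) (hmin : (i0 - 1) * m < t) :
    ctsLoopA t m (PySem.List.pyRange a b 1) =
      (i0, PySem.Int.floordiv (alignUp t i0) i0) := by
  have hn : 0 ≤ b - a := by omega
  obtain ⟨n, hn⟩ : ∃ n : Nat, b - a = (n : Int) := ⟨(b - a).toNat, by omega⟩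
  induction n generalizing a with
  | zero => omega
  | succ k ih =>
    rw [PySem.List.pyRange_one_cons (by omega), ctsLoopA]
    by_cases h : t ≤ a * m
    · -- then a = i0: a ≤ i0 and (i0-1)*m < t ≤ a*m forces i0 ≤ a
      have : i0 ≤ a := by nlinarith
      have : a = i0 := le_antisymm (by omega) this
      simp [this, hhit]
    · rw [if_neg h]
      have : a ≠ i0 := by rintro rfl; exact h hhit
      exact ih (a + 1) (by omega) (by omega) (by omega)

theorem compute_tex_size_spec : Claim_equal_compute_tex_size := by
  intro t cb _hdom hpre
  unfold Spec_compute_tex_size compute_tex_size compute_tex_size_alt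
  by_cases ht : t ≤ 0
  · simp [ht]
  · rw [if_neg ht, if_neg ht]
    set m : Int := if cb then PySem.Int.floordiv 4096 16 else 4096 with hmdef
    have hm : m = (if cb then (256 : Int) else 4096) := by
      cases cb <;> simp [hmdef]
    have hmpos : 0 < m := by rw [hm]; cases cb <;> norm_num
    have hcap : t ≤ m * m := by rw [hm]; cases cb <;> simpa [Pre_compute_tex_size] using hpre
    rw [if_neg (by omega), if_neg (by omega)]
    -- the closed-form column count
    set i0 := PySem.Int.floordiv (t + m - 1) m with hi0def
    have hi0 : i0 * m ≤ t + m - 1 ∧ t + m - 1 < (i0 + 1) * m := by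
      have := (PySem.Int.floordiv_eq_iff_of_pos (a := t + m - 1) (b := m) (q := i0) hmpos).mp hi0def.symm
      exact this
    have hhit : t ≤ i0 * m := by nlinarith [hi0.1, hi0.2]
    have hmin : (i0 - 1) * m < t := by nlinarith [hi0.1, hi0.2]
    have hi0pos : 0 < i0 := by nlinarith
    have hi0le : i0 ≤ m := by
      -- t ≤ m*m and (i0-1)*m < t give (i0-1)*m < m*m, so i0-1 < m
      nlinarith
    rw [ctsLoopA_pyRange t m 1 (m + 1) i0 hmpos (by omega) (by omega) hhit hmin]
    -- alignUp t i0 // i0 = ceil(t / i0) = (t + i0 - 1) // i0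
    have hq : PySem.Int.floordiv (alignUp t i0) i0 = PySem.Int.floordiv (t + i0 - 1) i0 := by
      unfold alignUp
      rw [PySem.Int.floordiv_eq_ediv_of_pos hi0pos, Int.mul_ediv_cancel _ (by omega)]
    rw [hq]

-- ===== VERDICT =====
-- (theorem above is the verdict; stated by name per layout)
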